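-- pv_equiv track=rewrite | github.com/Normynator/IdleRagnarok | IdleRagnarok/client_functions/sprr/sprr.py | parse_frame_data513
-- ===== SOURCE A (Python) =====
-- def parse_frame_data513(data):
--     ret_data = {}
--     q = 0
--     j = 0
--     while j < data.__len__():
--         if data[j] == 0x00:
--             for i in range(data[j + 1]):
--                 ret_data[q] = 0x00
--                 q += 1
--             j += 1
--         else:
--             ret_data[q] = data[j]
--             q += 1
--         j += 1
--
--     return ret_data
-- ===== SOURCE B (Python) =====
-- def parse_frame_data513(data):
--     # pass 1: parse the byte stream into run-length tokens (value, count)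
--     toks = []
--     j = 0
--     while j < len(data):
--         if data[j] == 0:
--             toks.append((0, max(data[j + 1], 0)))
--             j += 2
--         else:
--             toks.append((data[j], 1))
--             j += 1
--     # pass 2: prefix-sum of the counts gives each token its starting key
--     starts = [0]
--     for _, c in toks:
--         starts.append(starts[-1] + c)
--     # pass 3: expand each token over its key range
--     return {s + k: v for (v, c), s in zip(toks, starts) for k in range(c)}
-- ===== Notes on version B (the rewrite author's own statement) =====
-- stated objective: alternative
-- what changed: B replaces A's single interleaved scan (dict writes under a running key counter q) by a staged pipeline: tokenize the stream into run-length (value, count) pairs, prefix-sum the counts into a starts list, then expand each token over its key range with zip(toks, starts).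
import Mathlib
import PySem

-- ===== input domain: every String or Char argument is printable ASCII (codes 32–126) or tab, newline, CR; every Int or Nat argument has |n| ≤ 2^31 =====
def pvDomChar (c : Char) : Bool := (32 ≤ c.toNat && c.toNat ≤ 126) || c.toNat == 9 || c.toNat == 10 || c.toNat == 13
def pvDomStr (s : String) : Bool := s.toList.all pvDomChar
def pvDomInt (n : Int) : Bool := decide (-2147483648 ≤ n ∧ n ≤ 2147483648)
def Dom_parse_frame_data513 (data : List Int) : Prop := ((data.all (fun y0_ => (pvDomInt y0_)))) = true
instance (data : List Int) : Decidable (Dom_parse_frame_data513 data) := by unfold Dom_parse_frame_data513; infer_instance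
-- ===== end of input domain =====

-- B replaces A's single interleaved scan (dict writes under a running key counter) by three
-- stages: tokenize into run-length (value, count) pairs, prefix-sum the counts into starting
-- keys, expand each token over its key range (alternative decomposition, same cost).

-- ===== PORT A =====
-- while loop over index j with state (ret_data, q); the inner 'for i in range(data[j + 1])'
-- writes q ↦ 0 and bumps q.  'data[j + 1]' out of range is Python's IndexError:
-- PySem.List.pyGet? returns none there; Pre_ excludes those inputs.
def pvGoA (data : List Int) (ret : PySem.Dict Int Int) (q : Int) (j : Nat) :
    PySem.Dict Int Int :=
  if h : j < data.length then
    if data[j] = 0 then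
      match PySem.List.pyGet? data ((j : Int) + 1) with
      | none => ret
      | some c =>
        let s := (PySem.List.pyRange 0 c 1).foldl
          (fun (s : PySem.Dict Int Int × Int) _ => (s.1.insert s.2 0, s.2 + 1)) (ret, q)
        pvGoA data s.1 s.2 (j + 1 + 1)
    else
      pvGoA data (ret.insert q data[j]) (q + 1) (j + 1)
  else ret
termination_by data.length - j


def parse_frame_data513 (data : List Int) : List (Int × Int) :=
  (pvGoA data PySem.Dict.empty 0 0).items

-- ===== PORT B =====
-- pass 1: the while loop appending (value, count) tokens; 'data[j + 1]' out of range is the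
-- IndexError (pyGet? = none), excluded by Pre_.
def pvToks (data : List Int) (j : Nat) : List (Int × Int) :=
  if h : j < data.length then
    if data[j] = 0 then
      match PySem.List.pyGet? data ((j : Int) + 1) with
      | none => []
      | some c => (0, max c 0) :: pvToks data (j + 2)
    else (data[j], 1) :: pvToks data (j + 1)
  else []
termination_by data.length - j

-- pass 2: 'starts.append(starts[-1] + c)' over the tokens, starting from [0]
def pvStarts (toks : List (Int × Int)) : List Int :=
  toks.foldl (fun s p => s ++ [PySem.List.pyGetD s (-1) 0 + p.2]) [0]

def parse_frame_data513_alt (data : List Int) : List (Int × Int) :=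
  let toks := pvToks data 0
  let starts := pvStarts toks
  -- pass 3: the dict comprehension {s + k: v for (v, c), s in zip(toks, starts) for k in range(c)}
  (((toks.zip starts).flatMap
      (fun p => (PySem.List.pyRange 0 p.1.2 1).map (fun k => (p.2 + k, p.1.1)))).foldl
    (fun (d : PySem.Dict Int Int) p => d.insert p.1 p.2) PySem.Dict.empty).items

-- ===== PRECONDITION & SPEC =====
-- Pre_ excludes exactly the inputs on which Python A raises IndexError (the scan meets a
-- zero byte with no byte after it, e.g. data ending in 0x00); B raises there too.
def pvOk : List Int → Bool
  | [] => true
  | 0 :: [] => false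
  | 0 :: _ :: rest => pvOk rest
  | _ :: rest => pvOk rest


def Pre_parse_frame_data513 (data : List Int) : Prop := pvOk data = true
instance (data : List Int) : Decidable (Pre_parse_frame_data513 data) := by
  unfold Pre_parse_frame_data513; infer_instance

def pvWitness_parse_frame_data513 : List Int := [5, 0, 3, 7, 0, 0, 2]

def Spec_parse_frame_data513 (data : List Int) (out : List (Int × Int)) : Prop := out = parse_frame_data513_alt data
instance (data : List Int) (out : List (Int × Int)) : Decidable (Spec_parse_frame_data513 data out) := by unfold Spec_parse_frame_data513; infer_instance

-- ===== CLAIM (what is proved, stated in full; the proofs are below) =====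
def Claim_equal_parse_frame_data513 : Prop := ∀ (data : List Int), Dom_parse_frame_data513 data → Pre_parse_frame_data513 data → Spec_parse_frame_data513 data (parse_frame_data513 data)

-- ===== LEMMAS AND PROOFS =====

-- proof-side flat decode: the list of decoded bytes in order
def pvGoB (data : List Int) (out : List Int) (j : Nat) : List Int :=
  if h : j < data.length then
    if data[j] = 0 then
      match PySem.List.pyGet? data ((j : Int) + 1) with
      | none => out
      | some c => pvGoB data (out ++ List.replicate c.toNat 0) (j + 2)
    else pvGoB data (out ++ [data[j]]) (j + 1)
  else out
termination_by data.length - j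

-- proof-side running prefix sums of the token counts
def pvSums (a : Int) : List (Int × Int) → List Int
  | [] => []
  | p :: t => (a + p.2) :: pvSums (a + p.2) t

theorem pvOk_cons_ne (x : Int) (rest : List Int) (hx : x ≠ 0) :
    pvOk (x :: rest) = pvOk rest := by
  cases rest <;> simp [pvOk, hx]

theorem pvGoB_acc (data : List Int) (j : Nat) (out : List Int) :
    pvGoB data out j = out ++ pvGoB data [] j := by
  rw [pvGoB]; conv_rhs => rw [pvGoB]
  split
  · split
    · cases hc : PySem.List.pyGet? data ((j : Int) + 1) with
      | none => simp
      | some c =>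
        dsimp only
        rw [pvGoB_acc data (j + 2) (out ++ List.replicate c.toNat 0),
            pvGoB_acc data (j + 2) ([] ++ List.replicate c.toNat 0)]
        simp
    · rw [pvGoB_acc data (j + 1), pvGoB_acc data (j + 1) ([] ++ _)]
      simp
  · simp
termination_by data.length - j
decreasing_by all_goals omega

theorem pvLenRange (c : Int) : (PySem.List.pyRange 0 c 1).length = c.toNat := by
  rw [PySem.List.pyRange_of_pos 0 c (by omega)]
  by_cases h : 0 < c
  · simp [h]
  · simp [h]; omega

theorem pvPairFold (L : List Int) (d : PySem.Dict Int Int) (q : Int)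
    (hlt : ∀ k ∈ d.keys, k < q) (hnd : d.keys.Nodup) :
    (L.foldl (fun (s : PySem.Dict Int Int × Int) _ => (s.1.insert s.2 0, s.2 + 1)) (d, q)).1.items
        = d.items ++ PySem.List.enumerate (List.replicate L.length (0 : Int)) q ∧
    (L.foldl (fun (s : PySem.Dict Int Int × Int) _ => (s.1.insert s.2 0, s.2 + 1)) (d, q)).2
        = q + L.length ∧
    (∀ k ∈ (L.foldl (fun (s : PySem.Dict Int Int × Int) _ => (s.1.insert s.2 0, s.2 + 1)) (d, q)).1.keys,
        k < q + L.length) ∧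
    (L.foldl (fun (s : PySem.Dict Int Int × Int) _ => (s.1.insert s.2 0, s.2 + 1)) (d, q)).1.keys.Nodup := by
  induction L generalizing d q with
  | nil => simpa using ⟨hlt, hnd⟩
  | cons x L ih =>
    have hqc : d.contains q = false := by
      rw [PySem.Dict.contains_eq_decide_mem_keys]
      simp only [decide_eq_false_iff_not]
      intro hmem; exact absurd (hlt q hmem) (lt_irrefl q)
    have hkeys := PySem.Dict.keys_insert_of_not_contains d (0 : Int) hqc
    have hlt' : ∀ k ∈ (d.insert q 0).keys, k < q + 1 := by
      rw [hkeys]; intro k hk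
      rcases List.mem_append.mp hk with h | h
      · exact lt_trans (hlt k h) (by omega)
      · simp at h; omega
    have hnd' : (d.insert q 0).keys.Nodup := by
      rw [hkeys]
      refine List.Nodup.append hnd (List.nodup_singleton q) ?_
      intro a ha hb; simp at hb; subst hb
      exact absurd (hlt a ha) (lt_irrefl a)
    obtain ⟨h1, h2, h3, h4⟩ := ih (d.insert q 0) (q + 1) hlt' hnd'
    refine ⟨?_, ?_, ?_, h4⟩
    · simp only [List.foldl_cons] at *
      rw [h1, PySem.Dict.items_insert_of_not_contains d (0 : Int) hqc]
      simp [PySem.List.enumerate_cons, List.replicate_succ, List.append_assoc]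
    · simp only [List.foldl_cons] at *
      rw [h2]; simp only [List.length_cons]; push_cast; ring
    · simp only [List.foldl_cons] at *
      intro k hk
      have := h3 k hk
      simp only [List.length_cons] at *; push_cast at *; omega

theorem pvMain (data : List Int) (j : Nat) (d : PySem.Dict Int Int) (q : Int)
    (hok : pvOk (data.drop j) = true)
    (hlt : ∀ k ∈ d.keys, k < q) (hnd : d.keys.Nodup) :
    (pvGoA data d q j).items = d.items ++ PySem.List.enumerate (pvGoB data [] j) q := by
  rw [pvGoA]; conv_rhs => rw [pvGoB]
  split
  · rename_i h
    have hdrop := List.drop_eq_getElem_cons h (l := data)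
    split
    · rename_i hz
      have h2 : j + 1 < data.length := by
        by_contra hcon
        have : data.drop (j + 1) = [] := List.drop_eq_nil_of_le (by omega)
        rw [hdrop, hz, this] at hok
        simp [pvOk] at hok
      have hc : PySem.List.pyGet? data ((j : Int) + 1) = some data[j + 1] := by
        have : ((j : Int) + 1) = ((j + 1 : Nat) : Int) := by push_cast; ring
        rw [this, PySem.List.pyGet?_natCast]
        simp [h2]
      rw [hc]; dsimp only
      obtain ⟨h1, hq2, h3, h4⟩ := pvPairFold (PySem.List.pyRange 0 data[j + 1] 1) d q hlt hnd
      have hok' : pvOk (data.drop (j + 1 + 1)) = true := by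
        have hdrop2 := List.drop_eq_getElem_cons h2 (l := data)
        rw [hdrop, hz, hdrop2] at hok
        simpa only [pvOk] using hok
      rw [← hq2] at h3
      rw [pvMain data (j + 1 + 1) _ _ hok' h3 h4, h1, hq2, pvLenRange]
      rw [pvGoB_acc data (j + 2) ([] ++ List.replicate data[j + 1].toNat 0),
          List.nil_append, PySem.List.enumerate_append, List.length_replicate]
      have he : j + 1 + 1 = j + 2 := rfl
      rw [he]
      simp [List.append_assoc]
    · rename_i hz
      have hqc : d.contains q = false := by
        rw [PySem.Dict.contains_eq_decide_mem_keys]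
        simp only [decide_eq_false_iff_not]
        intro hmem; exact absurd (hlt q hmem) (lt_irrefl q)
      have hkeys := PySem.Dict.keys_insert_of_not_contains d (data[j]) hqc
      have hlt' : ∀ k ∈ (d.insert q data[j]).keys, k < q + 1 := by
        rw [hkeys]; intro k hk
        rcases List.mem_append.mp hk with hm | hm
        · exact lt_trans (hlt k hm) (by omega)
        · simp at hm; omega
      have hnd' : (d.insert q data[j]).keys.Nodup := by
        rw [hkeys]
        refine List.Nodup.append hnd (List.nodup_singleton q) ?_
        intro a ha hb; simp at hb; subst hb
        exact absurd (hlt a ha) (lt_irrefl a)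
      have hok' : pvOk (data.drop (j + 1)) = true := by
        rw [hdrop, pvOk_cons_ne data[j] _ hz] at hok
        exact hok
      rw [pvMain data (j + 1) _ _ hok' hlt' hnd',
          PySem.Dict.items_insert_of_not_contains d (data[j]) hqc]
      rw [pvGoB_acc data (j + 1) ([] ++ [data[j]]), List.nil_append,
          PySem.List.enumerate_append]
      simp [PySem.List.enumerate_cons, List.append_assoc]
  · simp
termination_by data.length - j
decreasing_by all_goals omega

-- B-side lemma 1: the tokens flatten to the decoded byte list
theorem pvToks_flat (data : List Int) (j : Nat) :
    (pvToks data j).flatMap (fun t => List.replicate t.2.toNat t.1) = pvGoB data [] j := by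
  rw [pvToks]; conv_rhs => rw [pvGoB]
  split
  · split
    · cases hc : PySem.List.pyGet? data ((j : Int) + 1) with
      | none => simp
      | some c =>
        dsimp only
        rw [pvGoB_acc data (j + 2) ([] ++ List.replicate c.toNat 0), List.nil_append,
            List.flatMap_cons, pvToks_flat data (j + 2)]
        have : (max c 0).toNat = c.toNat := by omega
        rw [this]
    · rw [List.flatMap_cons, pvToks_flat data (j + 1),
          pvGoB_acc data (j + 1) ([] ++ [_]), List.nil_append]
      simp
  · simp
termination_by data.length - j
decreasing_by all_goals omega

-- B-side lemma 2: token counts are nonnegative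
theorem pvToks_nonneg (data : List Int) (j : Nat) :
    ∀ p ∈ pvToks data j, 0 ≤ p.2 := by
  rw [pvToks]
  split
  · split
    · cases hc : PySem.List.pyGet? data ((j : Int) + 1) with
      | none => simp
      | some c =>
        dsimp only; intro p hp
        rcases List.mem_cons.mp hp with h | h
        · subst h; simp
        · exact pvToks_nonneg data (j + 2) p h
    · intro p hp
      rcases List.mem_cons.mp hp with h | h
      · subst h; simp
      · exact pvToks_nonneg data (j + 1) p h
  · simp
termination_by data.length - j
decreasing_by all_goals omega

-- B-side lemma 3: the starts fold builds init ++ running sums from init's last element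
theorem pvStarts_fold (toks : List (Int × Int)) (init : List Int) (hne : init ≠ []) :
    toks.foldl (fun s p => s ++ [PySem.List.pyGetD s (-1) 0 + p.2]) init
      = init ++ pvSums (init.getLast hne) toks := by
  induction toks generalizing init with
  | nil => simp [pvSums]
  | cons p t ih =>
    rw [List.foldl_cons, PySem.List.pyGetD_neg_one init 0 hne,
        ih (init ++ [init.getLast hne + p.2]) (by simp)]
    simp [pvSums]

-- B-side lemma 4: a range of keys over one run equals enumerate of its replicate
theorem pvEnumRepl (v : Int) (n : Nat) : ∀ (a s : Int),
    (PySem.List.pyRange a (a + n) 1).map (fun k => (s + k, v))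
      = PySem.List.enumerate (List.replicate n v) (s + a) := by
  induction n with
  | zero => intro a s; simp [PySem.List.enumerate_nil]
  | succ n ih =>
    intro a s
    rw [PySem.List.pyRange_one_cons (by omega), List.map_cons, List.replicate_succ,
        PySem.List.enumerate_cons]
    have : a + ((n + 1 : Nat) : Int) = (a + 1) + (n : Int) := by push_cast; ring
    rw [this, ih (a + 1) s]
    have : s + a + 1 = s + (a + 1) := by ring
    rw [this]

-- B-side lemma 5: zipping tokens with their prefix sums and expanding = enumerate of the flat list
theorem pvZipExpand (toks : List (Int × Int)) (a : Int) (hnn : ∀ p ∈ toks, 0 ≤ p.2) :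
    (toks.zip (a :: pvSums a toks)).flatMap
        (fun p => (PySem.List.pyRange 0 p.1.2 1).map (fun k => (p.2 + k, p.1.1)))
      = PySem.List.enumerate (toks.flatMap (fun t => List.replicate t.2.toNat t.1)) a := by
  induction toks generalizing a with
  | nil => simp [PySem.List.enumerate_nil]
  | cons p t ih =>
    have hp : 0 ≤ p.2 := hnn p (List.mem_cons_self)
    rw [pvSums, List.zip_cons_cons, List.flatMap_cons, List.flatMap_cons,
        PySem.List.enumerate_append,
        ih (a + p.2) (fun q hq => hnn q (List.mem_cons_of_mem p hq))]
    have hc : p.2 = ((p.2.toNat : Nat) : Int) := by omega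
    congr 1
    · have h0 : (PySem.List.pyRange 0 p.2 1) = PySem.List.pyRange 0 (0 + (p.2.toNat : Int)) 1 := by
        rw [← hc]; ring_nf
      rw [h0, pvEnumRepl p.1 p.2.toNat 0 a]
      simp
    · congr 1
      simp [List.length_replicate]; omega

-- B-side lemma 6: folding inserts of pairwise-distinct keys into a fresh-keyed dict appends items
theorem pvInsertFold (ps : List (Int × Int)) (d : PySem.Dict Int Int)
    (hfr : ∀ p ∈ ps, ∀ k ∈ d.keys, k ≠ p.1)
    (hpw : ps.Pairwise (fun p q => p.1 ≠ q.1)) (hnd : d.keys.Nodup) :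
    (ps.foldl (fun (d : PySem.Dict Int Int) p => d.insert p.1 p.2) d).items = d.items ++ ps := by
  induction ps generalizing d with
  | nil => simp
  | cons p t ih =>
    have hqc : d.contains p.1 = false := by
      rw [PySem.Dict.contains_eq_decide_mem_keys]
      simp only [decide_eq_false_iff_not]
      intro hmem; exact hfr p (List.mem_cons_self) p.1 hmem rfl
    have hkeys := PySem.Dict.keys_insert_of_not_contains d p.2 hqc
    have hfr' : ∀ q ∈ t, ∀ k ∈ (d.insert p.1 p.2).keys, k ≠ q.1 := by
      intro q hq k hk
      rw [hkeys] at hk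
      rcases List.mem_append.mp hk with h | h
      · exact hfr q (List.mem_cons_of_mem p hq) k h
      · simp at h; subst h
        exact (List.pairwise_cons.mp hpw).1 q hq
    have hnd' : (d.insert p.1 p.2).keys.Nodup := by
      rw [hkeys]
      refine List.Nodup.append hnd (List.nodup_singleton p.1) ?_
      intro a ha hb; simp at hb; subst hb
      exact hfr p (List.mem_cons_self) _ ha rfl
    rw [List.foldl_cons, ih (d.insert p.1 p.2) hfr' (List.pairwise_cons.mp hpw).2 hnd',
        PySem.Dict.items_insert_of_not_contains d p.2 hqc]
    simp [List.append_assoc]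

-- ===== VERDICT (by name: the statement is the Claim_ definition above) =====
theorem parse_frame_data513_spec : Claim_equal_parse_frame_data513 := by
  intro data _ hpre
  unfold Spec_parse_frame_data513 parse_frame_data513 parse_frame_data513_alt
  have hA := pvMain data 0 PySem.Dict.empty 0 (by simpa using hpre)
      (by simp [PySem.Dict.keys_empty]) (by simp [PySem.Dict.keys_empty])
  have hstarts : pvStarts (pvToks data 0) = [0] ++ pvSums 0 (pvToks data 0) := by
    rw [pvStarts, pvStarts_fold (pvToks data 0) [0] (by simp)]
    rfl
  have hpairs : ((pvToks data 0).zip (pvStarts (pvToks data 0))).flatMap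
        (fun p => (PySem.List.pyRange 0 p.1.2 1).map (fun k => (p.2 + k, p.1.1)))
      = PySem.List.enumerate (pvGoB data [] 0) 0 := by
    rw [hstarts, List.singleton_append,
        pvZipExpand (pvToks data 0) 0 (pvToks_nonneg data 0), pvToks_flat]
  have hpw : (PySem.List.enumerate (pvGoB data [] 0) (0 : Int)).Pairwise
      (fun p q => p.1 ≠ q.1) := by
    exact (PySem.List.pairwise_lt_enumerate _ _).imp (fun h => ne_of_lt h)
  have hB := pvInsertFold (PySem.List.enumerate (pvGoB data [] 0) 0) PySem.Dict.empty
      (by simp [PySem.Dict.keys_empty]) hpw (by simp [PySem.Dict.keys_empty])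
  simp only [hpairs] at *
  rw [hA, hB]
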